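-- pv_equiv track=rewrite | github.com/fit-alessandro-berti/experiments-fm | create_preliminary_output.py | extract_tikzpicture_block
-- ===== SOURCE A (Python) =====
-- def extract_tikzpicture_block(latex_content: str) -> str:
--     lines = latex_content.splitlines()
--     start_idx: int | None = None
--     for idx, line in enumerate(lines):
--         if line == r"\begin{tikzpicture}":
--             start_idx = idx
--             break
--     if start_idx is None:
--         return latex_content
--
--     end_idx: int | None = None
--     for idx in range(start_idx, len(lines)):
--         if lines[idx] == r"\end{tikzpicture}":
--             end_idx = idx
--             break
--     if end_idx is None:
--         return "\n".join(lines[start_idx:])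
--     return "\n".join(lines[start_idx : end_idx + 1])
-- ===== SOURCE B (Python) =====
-- def extract_tikzpicture_block(latex_content: str) -> str:
--     collected = None
--     for line in latex_content.splitlines():
--         if collected is None:
--             if line == r"\begin{tikzpicture}":
--                 collected = [line]
--         else:
--             collected.append(line)
--             if line == r"\end{tikzpicture}":
--                 break
--     if collected is None:
--         return latex_content
--     return "\n".join(collected)
-- ===== Notes on version B (the rewrite author's own statement) =====
-- stated objective: simpler
-- what changed: Replaces A's two index-based scans (enumerate to find the begin line, then range(start,len) to find the end line, then slicing) with a single flagged pass that collects the block's lines directly, never touching indices or slices.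
import Mathlib
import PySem

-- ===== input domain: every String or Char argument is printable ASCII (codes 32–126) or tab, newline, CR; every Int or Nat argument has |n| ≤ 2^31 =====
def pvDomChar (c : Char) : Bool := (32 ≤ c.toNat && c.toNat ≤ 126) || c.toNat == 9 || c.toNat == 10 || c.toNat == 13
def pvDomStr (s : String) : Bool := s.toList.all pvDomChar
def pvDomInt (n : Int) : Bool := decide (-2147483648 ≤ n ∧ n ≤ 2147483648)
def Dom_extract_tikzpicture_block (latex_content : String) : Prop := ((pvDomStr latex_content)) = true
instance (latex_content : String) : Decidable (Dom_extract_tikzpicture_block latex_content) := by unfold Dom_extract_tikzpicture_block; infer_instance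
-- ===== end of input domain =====

-- B replaces A's two index-based scans and slices with one flagged pass that collects the block's lines directly (objective: simpler).

-- ===== PORT A =====
def pvBeginMarker : String := "\\begin{tikzpicture}"
def pvEndMarker : String := "\\end{tikzpicture}"

-- first loop of A: 'for idx, line in enumerate(lines): if line == begin: start_idx = idx; break'
def pvFindBegin : List String → Nat → Option Nat
  | [], _ => none
  | l :: rest, idx => if l = pvBeginMarker then some idx else pvFindBegin rest (idx + 1)

-- second loop of A: 'for idx in range(start_idx, len(lines)): if lines[idx] == end: end_idx = idx; break'
-- (indices come from range(start_idx, len(lines)) so they are in range; the pyGetD default "" never fires)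
def pvFindEnd (lines : List String) : List Int → Option Int
  | [] => none
  | i :: rest =>
      if PySem.List.pyGetD lines i "" = pvEndMarker then some i else pvFindEnd lines rest

def extract_tikzpicture_block (latex_content : String) : String :=
  let lines := PySem.Str.splitlines latex_content
  match pvFindBegin lines 0 with
  | none => latex_content
  | some start_idx =>
    match pvFindEnd lines (PySem.List.pyRange (start_idx : Int) (lines.length : Int) 1) with
    | none => PySem.Str.join "\n" (PySem.List.slice lines (some (start_idx : Int)) none)
    | some end_idx => PySem.Str.join "\n" (PySem.List.slice lines (some (start_idx : Int)) (some (end_idx + 1)))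

-- ===== PORT B =====
-- the started phase of B's loop: append each line, stop after the end marker
def pvCollect : List String → List String
  | [] => []
  | l :: rest => if l = pvEndMarker then [l] else l :: pvCollect rest

-- the not-yet-started phase of B's loop
def pvScan (latex_content : String) : List String → String
  | [] => latex_content
  | l :: rest =>
      if l = pvBeginMarker then PySem.Str.join "\n" (l :: pvCollect rest)
      else pvScan latex_content rest

def extract_tikzpicture_block_alt (latex_content : String) : String :=
  pvScan latex_content (PySem.Str.splitlines latex_content)

-- ===== PRECONDITION & SPEC =====
def Spec_extract_tikzpicture_block (latex_content : String) (out : String) : Prop := out = extract_tikzpicture_block_alt latex_content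
instance (latex_content : String) (out : String) : Decidable (Spec_extract_tikzpicture_block latex_content out) := by unfold Spec_extract_tikzpicture_block; infer_instance

-- ===== CLAIM (what is proved, stated in full; the proofs are below) =====
def Claim_equal_extract_tikzpicture_block : Prop := ∀ (latex_content : String), Dom_extract_tikzpicture_block latex_content → Spec_extract_tikzpicture_block latex_content (extract_tikzpicture_block latex_content)

-- ===== LEMMAS AND PROOFS =====

-- A's body as a function of an arbitrary line list
def pvACore (s : String) (lines : List String) : String :=
  match pvFindBegin lines 0 with
  | none => s
  | some start_idx =>
    match pvFindEnd lines (PySem.List.pyRange (start_idx : Int) (lines.length : Int) 1) with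
    | none => PySem.Str.join "\n" (PySem.List.slice lines (some (start_idx : Int)) none)
    | some end_idx => PySem.Str.join "\n" (PySem.List.slice lines (some (start_idx : Int)) (some (end_idx + 1)))

theorem pvFindBegin_shift (ls : List String) (n : Nat) :
    pvFindBegin ls (n + 1) = (pvFindBegin ls n).map (· + 1) := by
  induction ls generalizing n with
  | nil => rfl
  | cons l rest ih =>
      simp only [pvFindBegin]
      split
      · rfl
      · exact ih (n + 1)

theorem pvRange_shift (a b : Int) :
    PySem.List.pyRange (a + 1) (b + 1) 1 = (PySem.List.pyRange a b 1).map (· + 1) := by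
  simp only [PySem.List.pyRange_one, List.map_map]
  have : b + 1 - (a + 1) = b - a := by ring
  rw [this]
  exact List.map_congr_left (fun k _ => by simp [Function.comp]; ring)

theorem pvFindEnd_shift (l : String) (rest : List String) (idxs : List Int)
    (h : ∀ i ∈ idxs, 0 ≤ i) :
    pvFindEnd (l :: rest) (idxs.map (· + 1)) = (pvFindEnd rest idxs).map (· + 1) := by
  induction idxs with
  | nil => rfl
  | cons i is ih =>
      have hi : 0 ≤ i := h i (List.mem_cons_self ..)
      simp only [List.map_cons, pvFindEnd]
      have hget : PySem.List.pyGetD (l :: rest) (i + 1) "" = PySem.List.pyGetD rest i "" := by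
        lift i to ℕ using hi
        have h1 : (i : Int) + 1 = ((i + 1 : ℕ) : Int) := by push_cast; ring
        rw [h1, PySem.List.pyGetD_natCast, PySem.List.pyGetD_natCast]
        simp
      rw [hget]
      split
      · rfl
      · exact ih (fun j hj => h j (List.mem_cons_of_mem _ hj))

theorem pvFindEnd_mem (lines : List String) (idxs : List Int) (e : Int)
    (h : pvFindEnd lines idxs = some e) : e ∈ idxs := by
  induction idxs with
  | nil => simp [pvFindEnd] at h
  | cons i is ih =>
      simp only [pvFindEnd] at h
      split at h
      · cases h; exact List.mem_cons_self ..
      · exact List.mem_cons_of_mem _ (ih h)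

-- E': A's second loop started at index 0 computes exactly pvCollect
theorem pvEndCase (ls : List String) :
    (match pvFindEnd ls (PySem.List.pyRange 0 (ls.length : Int) 1) with
      | none => ls
      | some e => PySem.List.slice ls (some (0 : Int)) (some (e + 1))) = pvCollect ls := by
  induction ls with
  | nil => rfl
  | cons l rest ih =>
      have hlen : ((l :: rest).length : Int) = (rest.length : Int) + 1 := by simp
      rw [hlen, PySem.List.pyRange_one_cons (by positivity)]
      simp only [pvFindEnd]
      have h0 : PySem.List.pyGetD (l :: rest) 0 "" = l := by
        rw [show (0 : Int) = ((0 : ℕ) : Int) from rfl, PySem.List.pyGetD_natCast]; rfl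
      rw [h0]
      by_cases hl : l = pvEndMarker
      · simp only [hl, if_true]
        rw [PySem.List.slice_zero_start, PySem.List.slice_to _ (by norm_num)]
        simp [pvCollect]
      · rw [if_neg hl]
        rw [show (0 : Int) + 1 = 0 + 1 from rfl, pvRange_shift,
          pvFindEnd_shift l rest _ (fun i hi => (PySem.List.mem_pyRange_one.mp hi).1)]
        cases hE : pvFindEnd rest (PySem.List.pyRange 0 (rest.length : Int) 1) with
        | none =>
            rw [hE] at ih
            have ih' : rest = pvCollect rest := ih
            simp only [Option.map_none]
            simp only [pvCollect, if_neg hl]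
            rw [← ih']
        | some e =>
            have he : 0 ≤ e := (PySem.List.mem_pyRange_one.mp (pvFindEnd_mem _ _ _ hE)).1
            rw [hE] at ih
            have ih' : PySem.List.slice rest (some (0 : Int)) (some (e + 1)) = pvCollect rest := ih
            simp only [Option.map_some]
            simp only [pvCollect, if_neg hl]
            rw [← ih']
            rw [PySem.List.slice_zero_start, PySem.List.slice_zero_start,
              PySem.List.slice_to _ (by omega), PySem.List.slice_to _ (by omega)]
            have h2 : (e + 1 + 1).toNat = (e + 1).toNat + 1 := by omega
            rw [h2, List.take_succ_cons]

theorem pvMain (s : String) (ls : List String) : pvACore s ls = pvScan s ls := by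
  induction ls with
  | nil => rfl
  | cons l rest ih =>
      simp only [pvScan]
      by_cases hl : l = pvBeginMarker
      · rw [if_pos hl]
        have hne : l ≠ pvEndMarker := by rw [hl]; decide
        have hB : pvFindBegin (l :: rest) 0 = some 0 := by
          simp [pvFindBegin, hl]
        simp only [pvACore, hB]
        have := pvEndCase (l :: rest)
        cases hE : pvFindEnd (l :: rest) (PySem.List.pyRange ((0 : ℕ) : Int) ((l :: rest).length : Int) 1) with
        | none =>
            rw [show ((0:ℕ):Int) = (0:Int) from rfl] at hE
            rw [hE] at this
            have this' : (l :: rest) = pvCollect (l :: rest) := this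
            have hcol : pvCollect (l :: rest) = l :: pvCollect rest := by
              simp [pvCollect, hne]
            rw [hcol] at this'
            show PySem.Str.join "\n" (PySem.List.slice (l :: rest) (some ((0:ℕ):Int)) none) = _
            rw [show ((0:ℕ):Int) = (0:Int) from rfl, PySem.List.slice_zero_start,
              PySem.List.slice_none_none, this']
        | some e =>
            rw [show ((0:ℕ):Int) = (0:Int) from rfl] at hE
            rw [hE] at this
            have this' : PySem.List.slice (l :: rest) (some (0:Int)) (some (e + 1)) = pvCollect (l :: rest) := this
            have hcol : pvCollect (l :: rest) = l :: pvCollect rest := by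
              simp [pvCollect, hne]
            show PySem.Str.join "\n" (PySem.List.slice (l :: rest) (some ((0:ℕ):Int)) (some (e + 1))) = _
            rw [show ((0:ℕ):Int) = (0:Int) from rfl, this', hcol]
      · rw [if_neg hl]
        rw [← ih]
        have hB : pvFindBegin (l :: rest) 0 = (pvFindBegin rest 0).map (· + 1) := by
          simp only [pvFindBegin, if_neg hl]
          exact pvFindBegin_shift rest 0
        simp only [pvACore, hB]
        cases hS : pvFindBegin rest 0 with
        | none => rfl
        | some i =>
            simp only [Option.map_some]
            have hcast : ((i + 1 : ℕ) : Int) = (i : Int) + 1 := by push_cast; ring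
            have hlen : ((l :: rest).length : Int) = (rest.length : Int) + 1 := by simp
            rw [hcast, hlen, pvRange_shift,
              pvFindEnd_shift l rest _ (fun j hj => le_trans (by positivity) (PySem.List.mem_pyRange_one.mp hj).1)]
            cases hE : pvFindEnd rest (PySem.List.pyRange (i : Int) (rest.length : Int) 1) with
            | none =>
                simp only [Option.map_none]
                rw [← hcast, PySem.List.slice_from_natCast, PySem.List.slice_from_natCast,
                  List.drop_succ_cons]
            | some e =>
                have he : (i : Int) ≤ e := (PySem.List.mem_pyRange_one.mp (pvFindEnd_mem _ _ _ hE)).1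
                simp only [Option.map_some]
                rw [PySem.List.slice_toNat _ (by positivity) (by omega),
                  PySem.List.slice_toNat _ (by positivity) (by omega)]
                have hd : ((i : Int) + 1).toNat = i + 1 := by omega
                have hd2 : ((i : Int)).toNat = i := by omega
                rw [hd, hd2, List.drop_succ_cons]
                have ht : (e + 1 + 1).toNat - (i + 1) = (e + 1).toNat - i := by omega
                rw [ht]

-- ===== VERDICT (by name: the statement is the Claim_ definition above) =====
theorem extract_tikzpicture_block_spec : Claim_equal_extract_tikzpicture_block := by
  intro s _
  show extract_tikzpicture_block s = extract_tikzpicture_block_alt s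
  exact pvMain s (PySem.Str.splitlines s)
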